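-- pv_equiv track=rewrite | github.com/mxer/kaldi-recipes | spraakbanken/s5/spr_local/spr_text_to_lexform.py | map_word
-- ===== SOURCE A (Python) =====
-- def map_word(word, lexicon, first_word_in_sentence):
--     if "\\" in word:
--         i = word.index("\\") - 1
--         return map_word(word[:i], lexicon, first_word_in_sentence) + map_word(word[i+2:], lexicon, False)
--
--     if "." in word[:-1]:
--         p1, p2 = word.split(".", 1)
--         return map_word(p1, lexicon, first_word_in_sentence) + map_word(p2, lexicon, False)
--
--     if "," in word[:-1]:
--         p1, p2 = word.split(",", 1)
--         return map_word(p1, lexicon, first_word_in_sentence) + map_word(p2, lexicon, False)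
--
--     if "?" in word[:-1]:
--         p1, p2 = word.split("?", 1)
--         return map_word(p1, lexicon, first_word_in_sentence) + map_word(p2, lexicon, False)
--
--     if word not in lexicon:
--         word = word.strip("!,;?.\"+-")
--         if word not in lexicon and word.lower() in lexicon:
--             word = word.lower()
--         if word not in lexicon and first_word_in_sentence:
--             word = word.lower()
--
--     if len(word.strip()) > 0:
--         return [word]
--     else:
--         return []
-- ===== SOURCE B (Python) =====
-- def _split_once(seg):
--     # leftmost applicable split, same ordered checks as the spec:
--     # backslash (index-1 / index+2), then '.', ',', '?' occurring in seg[:-1]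
--     if "\\" in seg:
--         i = seg.index("\\") - 1
--         return seg[:i], seg[i + 2:]
--     for sep in ".,?":
--         if sep in seg[:-1]:
--             p1, p2 = seg.split(sep, 1)
--             return p1, p2
--     return None
--
--
-- def _normalize(seg, lexicon, first):
--     if seg not in lexicon:
--         seg = seg.strip("!,;?.\"+-")
--         if seg not in lexicon and seg.lower() in lexicon:
--             seg = seg.lower()
--         if seg not in lexicon and first:
--             seg = seg.lower()
--     return seg
--
--
-- def map_word(word, lexicon, first_word_in_sentence):
--     out = []
--     stack = [(word, first_word_in_sentence)]
--     while stack: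
--         seg, first = stack.pop()
--         halves = _split_once(seg)
--         if halves is not None:
--             p1, p2 = halves
--             stack.append((p2, False))
--             stack.append((p1, first))
--         else:
--             w = _normalize(seg, lexicon, first)
--             if len(w.strip()) > 0:
--                 out.append(w)
--     return out
-- ===== Notes on version B (the rewrite author's own statement) =====
-- stated objective: alternative
-- what changed: A's recursive divide-and-recurse over the word is replaced by an iterative worklist: an explicit stack of (segment, first-flag) pairs is popped left-first, split segments push their halves back, and unsplittable segments are normalized and appended to an output list built left-to-right.
import Mathlib
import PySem

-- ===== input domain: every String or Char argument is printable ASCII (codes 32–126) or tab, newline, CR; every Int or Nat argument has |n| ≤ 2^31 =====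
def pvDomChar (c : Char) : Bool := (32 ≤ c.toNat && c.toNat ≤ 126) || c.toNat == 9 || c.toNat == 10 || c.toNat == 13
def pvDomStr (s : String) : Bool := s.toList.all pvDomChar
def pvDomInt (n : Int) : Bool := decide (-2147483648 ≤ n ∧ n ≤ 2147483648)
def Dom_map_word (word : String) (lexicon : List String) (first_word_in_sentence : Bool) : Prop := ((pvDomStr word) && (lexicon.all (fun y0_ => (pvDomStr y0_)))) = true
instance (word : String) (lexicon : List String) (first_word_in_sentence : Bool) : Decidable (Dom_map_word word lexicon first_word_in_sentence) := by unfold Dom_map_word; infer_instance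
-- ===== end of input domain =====

-- B replaces A's recursion by an iterative worklist of (segment, first-flag) pairs popped left-first,
-- building the output left-to-right (objective: alternative decomposition, same cost).

-- ===== PORT A =====
-- Facts cited by the ports' termination proofs (they must precede the definitions).

theorem pvIsInSingleton (c : Char) (s : List Char) :
    PySem.Chars.isIn [c] s = true ↔ c ∈ s := by
  rw [PySem.Chars.isIn_iff_infix]
  constructor
  · intro h; exact h.mem (by simp)
  · intro h
    obtain ⟨l, r, rfl⟩ := List.append_of_mem h
    exact ⟨l, r, by simp⟩

theorem pvSliceNegOne (w : List Char) :
    PySem.List.slice w none (some (-1)) = w.dropLast := by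
  cases w with
  | nil => rfl
  | cons a t =>
    have hc : PySem.List.clampIdx (a :: t).length (-1) = t.length := by
      simp only [PySem.List.clampIdx, List.length_cons]
      split_ifs <;> omega
    simp only [PySem.List.slice, hc, List.drop_zero, Nat.sub_zero]
    rw [List.dropLast_eq_take]
    simp

-- piece lengths of a single-character first-occurrence split
theorem pvLenPieces (c : Char) (w : List Char) (hc : c ∈ w) :
    (w.takeWhile (· ≠ c)).length < w.length ∧ ((w.dropWhile (· ≠ c)).tail).length < w.length := by
  have hsum : (w.takeWhile (· ≠ c)).length + (w.dropWhile (· ≠ c)).length = w.length := by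
    rw [← List.length_append, List.takeWhile_append_dropWhile]
  have hne : w.dropWhile (· ≠ c) ≠ [] := by
    intro h
    have := (List.dropWhile_eq_nil_iff).1 h c hc
    simp at this
  have h1 : 1 ≤ (w.dropWhile (· ≠ c)).length := by
    cases h : w.dropWhile (· ≠ c) with
    | nil => exact absurd h hne
    | cons x xs => simp
  have ht : ((w.dropWhile (· ≠ c)).tail).length = (w.dropWhile (· ≠ c)).length - 1 := by
    simp [List.length_tail]
  omega

theorem pvMemOfSliceNegOne (c : Char) (w : List Char)
    (h : PySem.Chars.isIn [c] (PySem.Chars.slice w none (some (-1))) = true) : c ∈ w := by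
  rw [PySem.Chars.slice_eq_listSlice, pvSliceNegOne, pvIsInSingleton] at h
  exact (List.dropLast_sublist w).mem h

theorem pvClampLt (n : Nat) (i : Int) (hn : 1 ≤ n) (hi : i < n) :
    PySem.List.clampIdx n i < n := by
  simp only [PySem.List.clampIdx]
  split_ifs <;> omega

theorem pvLenSliceTo (c : Char) (w : List Char) (hb : PySem.Chars.isIn [c] w = true) :
    (PySem.Chars.slice w none (some (PySem.Chars.find w [c] - 1))).length < w.length := by
  have hmem : c ∈ w := (pvIsInSingleton c w).1 hb
  have hn : 1 ≤ w.length := by cases w with | nil => simp at hmem | cons a t => simp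
  have hle : PySem.Chars.find w [c] ≤ (w.length : Int) := PySem.Chars.find_le_length w [c]
  rw [PySem.Chars.slice_eq_listSlice]
  simp only [PySem.List.slice, List.drop_zero, Nat.sub_zero, List.length_take]
  have := pvClampLt w.length (PySem.Chars.find w [c] - 1) hn (by omega)
  omega

theorem pvLenSliceFrom (c : Char) (w : List Char) (hb : PySem.Chars.isIn [c] w = true) :
    (PySem.Chars.slice w (some (PySem.Chars.find w [c] - 1 + 2)) none).length < w.length := by
  have hmem : c ∈ w := (pvIsInSingleton c w).1 hb
  have hn : 1 ≤ w.length := by cases w with | nil => simp at hmem | cons a t => simp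
  have hpos : 0 ≤ PySem.Chars.find w [c] := (PySem.Chars.find_nonneg_iff w [c]).2 ((PySem.Chars.isIn_iff_infix [c] w).1 hb)
  rw [PySem.Chars.slice_eq_listSlice]
  simp only [PySem.List.slice, List.length_take, List.length_drop]
  have ha : 1 ≤ PySem.List.clampIdx w.length (PySem.Chars.find w [c] - 1 + 2) := by
    simp only [PySem.List.clampIdx]
    split_ifs <;> omega
  omega

theorem pvGo0 (c : Char) : ∀ (f : Nat) (l' : List Char) (acc' : List (List Char)),
    PySem.Chars.splitOnMax.go [c] f 0 l' [] acc' = (l' :: acc').reverse := by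
  intro f l' acc'
  cases f with
  | zero => rw [PySem.Chars.splitOnMax.go]; simp
  | succ f =>
    cases l' with
    | nil => rw [PySem.Chars.splitOnMax.go] <;> simp
    | cons a t => rw [PySem.Chars.splitOnMax.go]; simp

-- closed form of splitOnMax.go for a single-character separator and maxsplit 1
theorem pvGo1 (c : Char) : ∀ (l cur : List Char) (acc : List (List Char)) (f : Nat), l.length < f →
    PySem.Chars.splitOnMax.go [c] f 1 l cur acc =
      (if c ∈ l then ((l.dropWhile (· ≠ c)).tail) :: (cur.reverse ++ l.takeWhile (· ≠ c)) :: acc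
       else (cur.reverse ++ l) :: acc).reverse := by
  intro l
  induction l with
  | nil =>
    intro cur acc f hf
    cases f with
    | zero => omega
    | succ f => rw [PySem.Chars.splitOnMax.go] <;> simp
  | cons a t ih =>
    intro cur acc f hf
    cases f with
    | zero => omega
    | succ f =>
      rw [PySem.Chars.splitOnMax.go]
      by_cases hac : a = c
      · subst hac
        simp only [List.isPrefixOf, List.length_cons] at *
        simp [pvGo0, List.dropWhile, List.takeWhile]
      · have hpre : [c].isPrefixOf (a :: t) = false := by
          simp [List.isPrefixOf]; intro h; exact absurd h.symm hac
        simp only [hpre, Bool.false_eq_true, if_false]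
        rw [ih (a :: cur) acc f (by simp at hf ⊢; omega)]
        by_cases hct : c ∈ t
        · simp [hct, hac, Ne.symm hac]
        · simp [hct, List.takeWhile_cons, Ne.symm hac]

theorem pvSplitMaxChar (c : Char) (w : List Char) (hc : c ∈ w) :
    PySem.Chars.splitMax? w [c] 1 =
      some [w.takeWhile (· ≠ c), (w.dropWhile (· ≠ c)).tail] := by
  simp only [PySem.Chars.splitMax?, PySem.Chars.splitOnMax]
  norm_num
  rw [pvGo1 c w [] [] (w.length + 1) (by omega)]
  simp [hc]

theorem pvLenSplit (c : Char) (w p1 p2 : List Char) (r : List (List Char))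
    (hd : PySem.Chars.isIn [c] (PySem.Chars.slice w none (some (-1))) = true)
    (hs : PySem.Chars.splitMax? w [c] 1 = some (p1 :: p2 :: r)) :
    p1.length < w.length ∧ p2.length < w.length := by
  have hc : c ∈ w := pvMemOfSliceNegOne c w hd
  rw [pvSplitMaxChar c w hc] at hs
  simp only [Option.some.injEq, List.cons.injEq] at hs
  obtain ⟨rfl, rfl, -⟩ := hs
  exact pvLenPieces c w hc

-- literal transliteration of A's recursion, on the List Char side
def pvMapA (lex : List (List Char)) (w : List Char) (first : Bool) : List (List Char) :=
  if hb : PySem.Chars.isIn ['\\'] w = true then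
    let i : Int := PySem.Chars.find w ['\\'] - 1
    pvMapA lex (PySem.Chars.slice w none (some i)) first ++
      pvMapA lex (PySem.Chars.slice w (some (i + 2)) none) false
  else if hd : PySem.Chars.isIn ['.'] (PySem.Chars.slice w none (some (-1))) = true then
    match hs : PySem.Chars.splitMax? w ['.'] 1 with
    | some (p1 :: p2 :: _) => pvMapA lex p1 first ++ pvMapA lex p2 false
    | _ => []
  else if hc : PySem.Chars.isIn [','] (PySem.Chars.slice w none (some (-1))) = true then
    match hs : PySem.Chars.splitMax? w [','] 1 with
    | some (p1 :: p2 :: _) => pvMapA lex p1 first ++ pvMapA lex p2 false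
    | _ => []
  else if hq : PySem.Chars.isIn ['?'] (PySem.Chars.slice w none (some (-1))) = true then
    match hs : PySem.Chars.splitMax? w ['?'] 1 with
    | some (p1 :: p2 :: _) => pvMapA lex p1 first ++ pvMapA lex p2 false
    | _ => []
  else
    let w1 : List Char :=
      if w ∈ lex then w
      else
        let a := PySem.Chars.stripChars w ['!', ',', ';', '?', '.', '"', '+', '-']
        let b := if a ∉ lex ∧ PySem.Chars.lower a ∈ lex then PySem.Chars.lower a else a
        if b ∉ lex ∧ first then PySem.Chars.lower b else b
    if 0 < (PySem.Chars.strip w1).length then [w1] else []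
termination_by w.length
decreasing_by
  · exact pvLenSliceTo '\\' w hb
  · exact pvLenSliceFrom '\\' w hb
  · exact (pvLenSplit '.' w _ _ _ hd hs).1
  · exact (pvLenSplit '.' w _ _ _ hd hs).2
  · exact (pvLenSplit ',' w _ _ _ hc hs).1
  · exact (pvLenSplit ',' w _ _ _ hc hs).2
  · exact (pvLenSplit '?' w _ _ _ hq hs).1
  · exact (pvLenSplit '?' w _ _ _ hq hs).2

def map_word (word : String) (lexicon : List String) (first_word_in_sentence : Bool) : List String :=
  (pvMapA (lexicon.map String.toList) word.toList first_word_in_sentence).map String.ofList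

-- ===== PORT B =====
-- port of Source B's _split_once: leftmost applicable split, same ordered checks
def pvSplitOnce (seg : List Char) : Option (List Char × List Char) :=
  if PySem.Chars.isIn ['\\'] seg = true then
    let i : Int := PySem.Chars.find seg ['\\'] - 1
    some (PySem.Chars.slice seg none (some i), PySem.Chars.slice seg (some (i + 2)) none)
  else if PySem.Chars.isIn ['.'] (PySem.Chars.slice seg none (some (-1))) = true then
    match PySem.Chars.splitMax? seg ['.'] 1 with
    | some (p1 :: p2 :: _) => some (p1, p2)
    | _ => none
  else if PySem.Chars.isIn [','] (PySem.Chars.slice seg none (some (-1))) = true then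
    match PySem.Chars.splitMax? seg [','] 1 with
    | some (p1 :: p2 :: _) => some (p1, p2)
    | _ => none
  else if PySem.Chars.isIn ['?'] (PySem.Chars.slice seg none (some (-1))) = true then
    match PySem.Chars.splitMax? seg ['?'] 1 with
    | some (p1 :: p2 :: _) => some (p1, p2)
    | _ => none
  else none

-- port of Source B's _normalize
def pvNormalize (lex : List (List Char)) (seg : List Char) (first : Bool) : List Char :=
  if seg ∈ lex then seg
  else
    let a := PySem.Chars.stripChars seg ['!', ',', ';', '?', '.', '"', '+', '-']
    let b := if a ∉ lex ∧ PySem.Chars.lower a ∈ lex then PySem.Chars.lower a else a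
    if b ∉ lex ∧ first then PySem.Chars.lower b else b

theorem pvSplitOnceLen (seg p1 p2 : List Char) (hs : pvSplitOnce seg = some (p1, p2)) :
    p1.length < seg.length ∧ p2.length < seg.length := by
  unfold pvSplitOnce at hs
  split_ifs at hs with h1 h2 h3 h4
  · simp only [Option.some.injEq, Prod.mk.injEq] at hs
    obtain ⟨rfl, rfl⟩ := hs
    exact ⟨pvLenSliceTo '\\' seg h1, pvLenSliceFrom '\\' seg h1⟩
  · have hc : '.' ∈ seg := pvMemOfSliceNegOne '.' seg h2
    rw [pvSplitMaxChar '.' seg hc] at hs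
    simp only [Option.some.injEq, Prod.mk.injEq] at hs
    obtain ⟨rfl, rfl⟩ := hs
    exact pvLenPieces '.' seg hc
  · have hc : ',' ∈ seg := pvMemOfSliceNegOne ',' seg h3
    rw [pvSplitMaxChar ',' seg hc] at hs
    simp only [Option.some.injEq, Prod.mk.injEq] at hs
    obtain ⟨rfl, rfl⟩ := hs
    exact pvLenPieces ',' seg hc
  · have hc : '?' ∈ seg := pvMemOfSliceNegOne '?' seg h4
    rw [pvSplitMaxChar '?' seg hc] at hs
    simp only [Option.some.injEq, Prod.mk.injEq] at hs
    obtain ⟨rfl, rfl⟩ := hs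
    exact pvLenPieces '?' seg hc

theorem pvSplitOnceMeasure (seg p1 p2 : List Char) (hs : pvSplitOnce seg = some (p1, p2)) :
    3 ^ p1.length + 3 ^ p2.length < 3 ^ seg.length := by
  obtain ⟨h1, h2⟩ := pvSplitOnceLen seg p1 p2 hs
  have e1 : 3 ^ p1.length ≤ 3 ^ (seg.length - 1) := Nat.pow_le_pow_right (by norm_num) (by omega)
  have e2 : 3 ^ p2.length ≤ 3 ^ (seg.length - 1) := Nat.pow_le_pow_right (by norm_num) (by omega)
  have h3 : 0 < 3 ^ (seg.length - 1) := Nat.pow_pos (by norm_num)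
  have hL : seg.length = (seg.length - 1) + 1 := by omega
  have hpow : 3 ^ seg.length = 3 ^ (seg.length - 1) * 3 := by
    conv_lhs => rw [hL]
    rw [pow_succ]
  omega

-- port of Source B's while-loop over the explicit stack
def pvLoopB (lex : List (List Char)) : List (List Char × Bool) → List (List Char) → List (List Char)
  | [], out => out
  | (seg, first) :: rest, out =>
    match hs : pvSplitOnce seg with
    | some (p1, p2) => pvLoopB lex ((p1, first) :: (p2, false) :: rest) out
    | none =>
      let w := pvNormalize lex seg first
      pvLoopB lex rest (if 0 < (PySem.Chars.strip w).length then out ++ [w] else out)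
termination_by stack => (stack.map (fun p => 3 ^ p.1.length)).sum
decreasing_by
  · simp only [List.map_cons, List.sum_cons]
    have := pvSplitOnceMeasure seg p1 p2 hs
    omega
  · simp only [List.map_cons, List.sum_cons]
    have : 0 < 3 ^ seg.length := Nat.pow_pos (by norm_num)
    omega

def map_word_alt (word : String) (lexicon : List String) (first_word_in_sentence : Bool) : List String :=
  (pvLoopB (lexicon.map String.toList) [(word.toList, first_word_in_sentence)] []).map String.ofList

-- ===== PRECONDITION & SPEC =====
def Spec_map_word (word : String) (lexicon : List String) (first_word_in_sentence : Bool) (out : List String) : Prop := out = map_word_alt word lexicon first_word_in_sentence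
instance (word : String) (lexicon : List String) (first_word_in_sentence : Bool) (out : List String) : Decidable (Spec_map_word word lexicon first_word_in_sentence out) := by unfold Spec_map_word; infer_instance

-- ===== CLAIM (what is proved, stated in full; the proofs are below) =====
def Claim_equal_map_word : Prop := ∀ (word : String) (lexicon : List String) (first_word_in_sentence : Bool), Dom_map_word word lexicon first_word_in_sentence → Spec_map_word word lexicon first_word_in_sentence (map_word word lexicon first_word_in_sentence)

-- ===== LEMMAS AND PROOFS =====

theorem pvMapA_split (lex : List (List Char)) (seg p1 p2 : List Char) (first : Bool)
    (hs : pvSplitOnce seg = some (p1, p2)) :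
    pvMapA lex seg first = pvMapA lex p1 first ++ pvMapA lex p2 false := by
  unfold pvSplitOnce at hs
  split_ifs at hs with h1 h2 h3 h4
  · simp only [Option.some.injEq, Prod.mk.injEq] at hs
    obtain ⟨rfl, rfl⟩ := hs
    rw [pvMapA, dif_pos h1]
  · have hc : '.' ∈ seg := pvMemOfSliceNegOne '.' seg h2
    rw [pvSplitMaxChar '.' seg hc] at hs
    simp only [Option.some.injEq, Prod.mk.injEq] at hs
    obtain ⟨rfl, rfl⟩ := hs
    rw [pvMapA, dif_neg h1, dif_pos h2]
    split
    · rename_i q1 q2 t heq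
      rw [pvSplitMaxChar '.' seg hc] at heq
      simp only [Option.some.injEq, List.cons.injEq] at heq
      obtain ⟨rfl, rfl, -⟩ := heq
      rfl
    · rename_i hne
      exact absurd (pvSplitMaxChar '.' seg hc) (by intro h; exact hne _ _ _ h)
  · have hc : ',' ∈ seg := pvMemOfSliceNegOne ',' seg h3
    rw [pvSplitMaxChar ',' seg hc] at hs
    simp only [Option.some.injEq, Prod.mk.injEq] at hs
    obtain ⟨rfl, rfl⟩ := hs
    rw [pvMapA, dif_neg h1, dif_neg h2, dif_pos h3]
    split
    · rename_i q1 q2 t heq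
      rw [pvSplitMaxChar ',' seg hc] at heq
      simp only [Option.some.injEq, List.cons.injEq] at heq
      obtain ⟨rfl, rfl, -⟩ := heq
      rfl
    · rename_i hne
      exact absurd (pvSplitMaxChar ',' seg hc) (by intro h; exact hne _ _ _ h)
  · have hc : '?' ∈ seg := pvMemOfSliceNegOne '?' seg h4
    rw [pvSplitMaxChar '?' seg hc] at hs
    simp only [Option.some.injEq, Prod.mk.injEq] at hs
    obtain ⟨rfl, rfl⟩ := hs
    rw [pvMapA, dif_neg h1, dif_neg h2, dif_neg h3, dif_pos h4]
    split
    · rename_i q1 q2 t heq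
      rw [pvSplitMaxChar '?' seg hc] at heq
      simp only [Option.some.injEq, List.cons.injEq] at heq
      obtain ⟨rfl, rfl, -⟩ := heq
      rfl
    · rename_i hne
      exact absurd (pvSplitMaxChar '?' seg hc) (by intro h; exact hne _ _ _ h)

theorem pvMapA_leaf (lex : List (List Char)) (seg : List Char) (first : Bool)
    (hs : pvSplitOnce seg = none) :
    pvMapA lex seg first =
      (if 0 < (PySem.Chars.strip (pvNormalize lex seg first)).length
       then [pvNormalize lex seg first] else []) := by
  unfold pvSplitOnce at hs
  split_ifs at hs with h1 h2 h3 h4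
  · have hc : '.' ∈ seg := pvMemOfSliceNegOne '.' seg h2
    rw [pvSplitMaxChar '.' seg hc] at hs
    simp at hs
  · have hc : ',' ∈ seg := pvMemOfSliceNegOne ',' seg h3
    rw [pvSplitMaxChar ',' seg hc] at hs
    simp at hs
  · have hc : '?' ∈ seg := pvMemOfSliceNegOne '?' seg h4
    rw [pvSplitMaxChar '?' seg hc] at hs
    simp at hs
  · rw [pvMapA, dif_neg h1, dif_neg h2, dif_neg h3, dif_neg h4]
    rfl

theorem pvLoopB_eq (lex : List (List Char)) (stack : List (List Char × Bool)) (out : List (List Char)) :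
    pvLoopB lex stack out = out ++ (stack.map (fun p => pvMapA lex p.1 p.2)).flatten := by
  fun_induction pvLoopB lex stack out
  case case1 => simp
  case case2 =>
    rename_i seg first rest out p1 p2 hs ih
    rw [ih]
    simp only [List.map_cons, List.flatten_cons, pvMapA_split lex seg p1 p2 first hs]
    simp
  case case3 =>
    rename_i seg first rest out hnone w ih
    have hw : w = pvNormalize lex seg first := rfl
    rw [hw] at ih ⊢
    simp only [dite_eq_ite] at ih
    rw [ih]
    simp only [List.map_cons, List.flatten_cons, pvMapA_leaf lex seg first hnone]
    split_ifs <;> simp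

-- ===== VERDICT (by name: the statement is the Claim_ definition above) =====
theorem map_word_spec : Claim_equal_map_word := by
  intro word lexicon first _
  unfold Spec_map_word map_word map_word_alt
  rw [pvLoopB_eq]
  simp
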